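-- pv_equiv track=rewrite | github.com/nicoavn/LikePad | Like/views.py | calculate_strikes
-- ===== SOURCE A (Python) =====
-- def calculate_strikes(stricks):
--     n = 0
--     amount = 0
--     for strick in range(stricks):
--         n = n+1
--         if n == 5:
--             amount = amount + 50
--         if n > 5:
--             amount = amount + 5
--     return amount
-- ===== SOURCE B (Python) =====
-- def calculate_strikes(stricks):
--     # closed form: first 5 strikes are worth 50, each further strike 5
--     if stricks >= 5:
--         return 50 + 5 * (stricks - 5)
--     return 0
-- ===== Notes on version B (the rewrite author's own statement) =====
-- stated objective: faster
-- what changed: replaces the per-strike accumulation loop with closed-form arithmetic (50 + 5*(stricks-5) when stricks >= 5, else 0)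
import Mathlib
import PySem

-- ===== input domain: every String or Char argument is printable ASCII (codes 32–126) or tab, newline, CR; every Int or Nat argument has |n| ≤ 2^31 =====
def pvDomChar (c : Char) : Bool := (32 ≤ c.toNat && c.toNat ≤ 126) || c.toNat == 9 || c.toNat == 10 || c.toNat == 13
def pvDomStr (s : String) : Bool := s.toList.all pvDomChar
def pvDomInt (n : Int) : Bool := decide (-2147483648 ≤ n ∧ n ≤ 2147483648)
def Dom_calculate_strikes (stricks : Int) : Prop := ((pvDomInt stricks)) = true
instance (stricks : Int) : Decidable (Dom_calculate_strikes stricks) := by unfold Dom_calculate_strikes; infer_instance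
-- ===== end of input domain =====

-- B replaces A's per-strike loop with closed-form arithmetic (objective: faster).

-- ===== PORT A =====
-- loop body of A: n += 1; if n == 5: amount += 50; if n > 5: amount += 5
def calcStep (s : Int × Int) (_strick : Int) : Int × Int :=
  let n := s.1 + 1
  let amount := s.2
  let amount := if n = 5 then amount + 50 else amount
  let amount := if n > 5 then amount + 5 else amount
  (n, amount)

def calculate_strikes (stricks : Int) : Int :=
  ((PySem.List.pyRange 0 stricks 1).foldl calcStep (0, 0)).2

-- ===== PORT B =====
def calculate_strikes_alt (stricks : Int) : Int :=
  if stricks ≥ 5 then 50 + 5 * (stricks - 5) else 0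

-- ===== PRECONDITION & SPEC =====
def Spec_calculate_strikes (stricks : Int) (out : Int) : Prop := out = calculate_strikes_alt stricks
instance (stricks : Int) (out : Int) : Decidable (Spec_calculate_strikes stricks out) := by unfold Spec_calculate_strikes; infer_instance

-- ===== CLAIM (what is proved, stated in full; the proofs are below) =====
def Claim_equal_calculate_strikes : Prop := ∀ (stricks : Int), Dom_calculate_strikes stricks → Spec_calculate_strikes stricks (calculate_strikes stricks)

-- ===== LEMMAS AND PROOFS =====
-- Loop invariant: after k iterations the state is (k, closed form of k).
theorem calc_fold (k : Nat) :
    (PySem.List.pyRange 0 (k : Int) 1).foldl calcStep (0, 0)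
      = ((k : Int), if (k : Int) ≥ 5 then 50 + 5 * ((k : Int) - 5) else 0) := by
  induction k with
  | zero => simp [PySem.List.pyRange_one_eq_nil]
  | succ k ih =>
    have h : ((k : Int) + 1) = ((k + 1 : Nat) : Int) := by push_cast; ring
    rw [show ((k + 1 : Nat) : Int) = (k : Int) + 1 by push_cast; ring,
        PySem.List.pyRange_one_succ_right (by positivity),
        List.foldl_append, ih]
    simp only [List.foldl, calcStep]
    split_ifs <;> simp_all <;> omega

theorem calculate_strikes_spec : Claim_equal_calculate_strikes := by
  intro stricks _
  unfold Spec_calculate_strikes calculate_strikes calculate_strikes_alt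
  by_cases h : stricks ≤ 0
  · rw [PySem.List.pyRange_one_eq_nil h]
    simp
    omega
  · have hk : stricks = ((stricks.toNat : Nat) : Int) := by omega
    rw [hk, calc_fold]
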